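-- pv_equiv track=rewrite | github.com/MrAliTheGreat/DataStructure | Assignment 4/4.py | find_min_node
-- ===== SOURCE A (Python) =====
-- def find_min_node(node , relations , cost_friendships , new_visited , min_cost_friendship , target_friend):
-- 	new_visited[node] = True
-- 	for friend in relations[node]:
-- 		if(not new_visited[friend]):
-- 			if(cost_friendships[friend] < min_cost_friendship):
-- 				min_cost_friendship = cost_friendships[friend]
-- 				target_friend = friend
-- 			min_cost_friendship , target_friend = find_min_node(friend , relations , cost_friendships , new_visited , min_cost_friendship , target_friend)
-- 	return min_cost_friendship , target_friend
-- ===== SOURCE B (Python) =====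
-- def find_min_node(node, relations, cost_friendships, new_visited, min_cost_friendship, target_friend):
--     # Iterative DFS with an explicit stack of neighbor frames (no recursion).
--     # Consumes each frame left to right, checking visited at consumption time,
--     # so the pre-order and hence the strict-< tie-breaking match the recursion.
--     new_visited[node] = True
--     best, who = min_cost_friendship, target_friend
--     stack = [list(relations[node])]
--     while stack:
--         frame = stack[-1]
--         if not frame:
--             stack.pop()
--             continue
--         friend = frame.pop(0)
--         if not new_visited[friend]:
--             c = cost_friendships[friend]
--             if c < best:
--                 best, who = c, friend
--             new_visited[friend] = True
--             stack.append(list(relations[friend]))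
--     return best, who
-- ===== Notes on version B (the rewrite author's own statement) =====
-- stated objective: alternative
-- what changed: B replaces A's recursive DFS (which threads the running minimum through recursive calls) with an iterative while-loop DFS over an explicit stack of neighbor frames, consuming frames left to right so the pre-order and strict-< tie-breaking match.
import Mathlib
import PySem

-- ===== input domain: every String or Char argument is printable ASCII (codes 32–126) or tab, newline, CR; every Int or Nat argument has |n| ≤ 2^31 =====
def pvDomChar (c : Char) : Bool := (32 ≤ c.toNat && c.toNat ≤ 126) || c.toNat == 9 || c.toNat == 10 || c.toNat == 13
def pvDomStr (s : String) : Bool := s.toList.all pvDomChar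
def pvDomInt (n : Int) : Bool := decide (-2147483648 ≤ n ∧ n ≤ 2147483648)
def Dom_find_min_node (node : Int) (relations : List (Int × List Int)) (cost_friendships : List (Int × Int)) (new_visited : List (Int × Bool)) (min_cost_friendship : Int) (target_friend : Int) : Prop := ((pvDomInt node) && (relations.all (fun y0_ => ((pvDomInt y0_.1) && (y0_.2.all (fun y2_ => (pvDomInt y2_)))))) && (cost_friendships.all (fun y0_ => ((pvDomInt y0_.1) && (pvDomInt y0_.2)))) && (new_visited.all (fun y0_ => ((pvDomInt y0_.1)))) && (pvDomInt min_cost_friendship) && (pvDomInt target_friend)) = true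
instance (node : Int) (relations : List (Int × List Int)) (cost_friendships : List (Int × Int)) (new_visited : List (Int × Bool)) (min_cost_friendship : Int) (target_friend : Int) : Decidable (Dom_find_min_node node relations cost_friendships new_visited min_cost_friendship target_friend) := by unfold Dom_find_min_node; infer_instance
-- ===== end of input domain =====

-- ===== PORT A =====
-- A is a recursive DFS that threads the running (min_cost, target) pair through the
-- recursion.  Python A mutates new_visited in place (the caller can observe that); the
-- equivalence proved here is about the RETURN value only — B performs the same mutation.
-- The recursion is made total with a fuel counter (new_visited.length + 1 levels suffice
-- on every input admitted by Pre_find_min_node, where the visited key set never grows).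
def goA (fuel : Nat) (node : Int) (rel : PySem.Dict Int (List Int))
    (cost : PySem.Dict Int Int) (v : PySem.Dict Int Bool) (mc tf : Int) :
    PySem.Dict Int Bool × Int × Int :=
  match fuel with
  | 0 => (v, mc, tf)                                   -- fuel guard only; never hit under Pre_
  | fuel + 1 =>
    -- new_visited[node] = True; for friend in relations[node]: ...
    (rel.getD node []).foldl
      (fun st friend =>
        if st.1.getD friend false = false then
          let p := if cost.getD friend 0 < st.2.1 then (cost.getD friend 0, friend)
                   else (st.2.1, st.2.2)
          goA fuel friend rel cost st.1 p.1 p.2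
        else st)
      (v.insert node true, mc, tf)

def find_min_node (node : Int) (relations : List (Int × List Int)) (cost_friendships : List (Int × Int)) (new_visited : List (Int × Bool)) (min_cost_friendship : Int) (target_friend : Int) : Int × Int :=
  (goA (new_visited.length + 1) node (PySem.Dict.mk relations) (PySem.Dict.mk cost_friendships)
      (PySem.Dict.mk new_visited) min_cost_friendship target_friend).2

-- ===== PORT B =====
-- B is an iterative DFS: a while loop over an explicit stack of neighbor frames,
-- consuming each frame left to right.  Totality device: each frame carries a fuel tag
-- (the allowed remaining nesting depth, mirroring A's fuel); a frame pushed by a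
-- descend carries one unit less.  The fuel-0 branch is a guard only, never hit under Pre_.
def edgeSum (rel : PySem.Dict Int (List Int)) : Nat := (rel.values.map List.length).sum

-- termination helper for runB: any looked-up neighbor list is no longer than edgeSum
theorem getD_len_le (rel : PySem.Dict Int (List Int)) (f : Int) :
    (rel.getD f []).length ≤ edgeSum rel := by
  rw [PySem.Dict.getD_eq_get?_getD]
  cases h : rel.get? f with
  | none => simp
  | some v =>
    have hv : v ∈ rel.values := by
      simp only [PySem.Dict.values]
      exact List.mem_map.mpr ⟨(f, v), PySem.Dict.mem_items_of_get?_eq_some rel h, rfl⟩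
    simpa [edgeSum] using List.single_le_sum (fun x _ => Nat.zero_le x) v.length
      (List.mem_map.mpr ⟨v, hv, rfl⟩)

def frameW (E : Nat) (p : Nat × List Int) : Nat := (p.2.length + 1) * (E + 2) ^ p.1

def runB (rel : PySem.Dict Int (List Int)) (cost : PySem.Dict Int Int)
    (stack : List (Nat × List Int)) (st : PySem.Dict Int Bool × Int × Int) :
    PySem.Dict Int Bool × Int × Int :=
  match stack with
  | [] => st                                                   -- while stack: loop exit
  | (_k, []) :: rest => runB rel cost rest st                   -- empty top frame: stack.pop()
  | (0, f :: fr) :: rest =>                                    -- friend = frame.pop(0)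
    if st.1.getD f false = false then
      -- fuel guard only (mirrors goA's exhausted fuel); never hit under Pre_
      let c := cost.getD f 0
      runB rel cost ((0, fr) :: rest) (st.1, if c < st.2.1 then (c, f) else st.2)
    else runB rel cost ((0, fr) :: rest) st
  | (j + 1, f :: fr) :: rest =>                                -- friend = frame.pop(0)
    if st.1.getD f false = false then
      let c := cost.getD f 0
      -- mark friend visited and push its neighbor frame (descend)
      runB rel cost ((j, rel.getD f []) :: (j + 1, fr) :: rest)
        (st.1.insert f true, if c < st.2.1 then (c, f) else st.2)
    else runB rel cost ((j + 1, fr) :: rest) st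
termination_by ((stack.map (frameW (edgeSum rel))).sum)
decreasing_by
  · simp only [List.map_cons, List.sum_cons, frameW, List.length_nil]
    have : 0 < (edgeSum rel + 2) ^ _k := Nat.pow_pos (by omega)
    omega
  · simp only [List.map_cons, List.sum_cons, frameW, List.length_cons]
    have := (Nat.mul_lt_mul_right (a := (edgeSum rel + 2) ^ 0)
      (Nat.pow_pos (by omega))).mpr (show fr.length + 1 < fr.length + 1 + 1 by omega)
    omega
  · simp only [List.map_cons, List.sum_cons, frameW, List.length_cons]
    have := (Nat.mul_lt_mul_right (a := (edgeSum rel + 2) ^ 0)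
      (Nat.pow_pos (by omega))).mpr (show fr.length + 1 < fr.length + 1 + 1 by omega)
    omega
  · simp only [List.map_cons, List.sum_cons, frameW, List.length_cons, Nat.succ_eq_add_one]
    have h1 : (rel.getD f []).length + 1 < edgeSum rel + 2 := by
      have := getD_len_le rel f; omega
    have h2 : ((rel.getD f []).length + 1) * (edgeSum rel + 2) ^ j
        < (edgeSum rel + 2) ^ (j + 1) := by
      calc ((rel.getD f []).length + 1) * (edgeSum rel + 2) ^ j
          < (edgeSum rel + 2) * (edgeSum rel + 2) ^ j :=
            (Nat.mul_lt_mul_right (Nat.pow_pos (by omega))).mpr h1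
        _ = (edgeSum rel + 2) ^ (j + 1) := by ring
    have h3 : (fr.length + 1 + 1) * (edgeSum rel + 2) ^ (j + 1)
        = (edgeSum rel + 2) ^ (j + 1) + (fr.length + 1) * (edgeSum rel + 2) ^ (j + 1) := by ring
    omega
  · simp only [List.map_cons, List.sum_cons, frameW, List.length_cons, Nat.succ_eq_add_one]
    have := (Nat.mul_lt_mul_right (a := (edgeSum rel + 2) ^ (j + 1))
      (Nat.pow_pos (by omega))).mpr (show fr.length + 1 < fr.length + 1 + 1 by omega)
    omega

def find_min_node_alt (node : Int) (relations : List (Int × List Int)) (cost_friendships : List (Int × Int)) (new_visited : List (Int × Bool)) (min_cost_friendship : Int) (target_friend : Int) : Int × Int :=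
  -- new_visited[node] = True; best, who = ...; stack = [list(relations[node])]; while ...
  (runB (PySem.Dict.mk relations) (PySem.Dict.mk cost_friendships)
      [(new_visited.length, (PySem.Dict.mk relations).getD node [])]
      ((PySem.Dict.mk new_visited).insert node true, min_cost_friendship, target_friend)).2

-- ===== PRECONDITION & SPEC =====
-- Pre_ is exactly the raise-free condition of Python A (which otherwise raises KeyError):
-- every node reachable from the start through initially-unvisited nodes — a reachability
-- shape property of the input graph, the start counting as visited — must be a key of
-- relations, a key of cost_friendships (except the start), and all its listed friends
-- keys of new_visited.  (The equivalence proof itself holds on every input — the two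
-- ports agree unconditionally; Pre_ only delimits where Python A returns at all.)
def pvReachStep (rel : PySem.Dict Int (List Int)) (vis : PySem.Dict Int Bool)
    (acc : List Int) : List Int :=
  acc.foldl (fun s u =>
    ((rel.getD u []).filter (fun f => vis.getD f false = false)).foldl
      (fun s f => PySem.Set.add s f) s) acc

def pvReach (node : Int) (rel : PySem.Dict Int (List Int)) (vis : PySem.Dict Int Bool)
    (fuel : Nat) : List Int :=
  (pvReachStep rel vis)^[fuel] [node]

def Pre_find_min_node (node : Int) (relations : List (Int × List Int)) (cost_friendships : List (Int × Int)) (new_visited : List (Int × Bool)) (min_cost_friendship : Int) (target_friend : Int) : Prop :=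
  let rel := PySem.Dict.mk relations
  let cost := PySem.Dict.mk cost_friendships
  let vise := (PySem.Dict.mk new_visited).insert node true
  ∀ u ∈ pvReach node rel vise ((relations.flatMap Prod.snd).length + 1),
    u ∈ rel.keys ∧ (u ≠ node → u ∈ cost.keys) ∧ ∀ f ∈ rel.getD u [], f ∈ vise.keys
instance (node : Int) (relations : List (Int × List Int)) (cost_friendships : List (Int × Int)) (new_visited : List (Int × Bool)) (min_cost_friendship : Int) (target_friend : Int) : Decidable (Pre_find_min_node node relations cost_friendships new_visited min_cost_friendship target_friend) := by unfold Pre_find_min_node; infer_instance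

def pvWitness_find_min_node : Int × (List (Int × List Int)) × (List (Int × Int)) × (List (Int × Bool)) × Int × Int :=
  (0, [(0, [1]), (1, [0])], [(0, 3), (1, 2)], [(0, false), (1, false)], 10, -1)

def Spec_find_min_node (node : Int) (relations : List (Int × List Int)) (cost_friendships : List (Int × Int)) (new_visited : List (Int × Bool)) (min_cost_friendship : Int) (target_friend : Int) (out : Int × Int) : Prop := out = find_min_node_alt node relations cost_friendships new_visited min_cost_friendship target_friend
instance (node : Int) (relations : List (Int × List Int)) (cost_friendships : List (Int × Int)) (new_visited : List (Int × Bool)) (min_cost_friendship : Int) (target_friend : Int) (out : Int × Int) : Decidable (Spec_find_min_node node relations cost_friendships new_visited min_cost_friendship target_friend out) := by unfold Spec_find_min_node; infer_instance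

-- ===== CLAIM (what is proved, stated in full; the proofs are below) =====
def Claim_equal_find_min_node : Prop := ∀ (node : Int) (relations : List (Int × List Int)) (cost_friendships : List (Int × Int)) (new_visited : List (Int × Bool)) (min_cost_friendship : Int) (target_friend : Int), Dom_find_min_node node relations cost_friendships new_visited min_cost_friendship target_friend → Pre_find_min_node node relations cost_friendships new_visited min_cost_friendship target_friend → Spec_find_min_node node relations cost_friendships new_visited min_cost_friendship target_friend (find_min_node node relations cost_friendships new_visited min_cost_friendship target_friend)

-- ===== LEMMAS AND PROOFS =====
-- Named form of A's fold body (definitionally equal to the lambda in goA).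
def fA (fuel : Nat) (rel : PySem.Dict Int (List Int)) (cost : PySem.Dict Int Int)
    (st : PySem.Dict Int Bool × Int × Int) (friend : Int) : PySem.Dict Int Bool × Int × Int :=
  if st.1.getD friend false = false then
    let p := if cost.getD friend 0 < st.2.1 then (cost.getD friend 0, friend)
             else (st.2.1, st.2.2)
    goA fuel friend rel cost st.1 p.1 p.2
  else st

lemma goA_succ (fuel : Nat) (node : Int) (rel : PySem.Dict Int (List Int))
    (cost : PySem.Dict Int Int) (v : PySem.Dict Int Bool) (mc tf : Int) :
    goA (fuel + 1) node rel cost v mc tf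
      = (rel.getD node []).foldl (fA fuel rel cost) (v.insert node true, mc, tf) := rfl

-- Simulation invariant: the stack machine processing a frame tagged with fuel k computes
-- exactly the fold of A's body fA k over that frame, then continues with the rest.
lemma runB_frame (rel : PySem.Dict Int (List Int)) (cost : PySem.Dict Int Int) :
    ∀ (k : Nat) (frame : List Int) (rest : List (Nat × List Int))
      (st : PySem.Dict Int Bool × Int × Int),
      runB rel cost ((k, frame) :: rest) st
        = runB rel cost rest (frame.foldl (fA k rel cost) st) := by
  intro k
  induction k using Nat.strong_induction_on with
  | _ k ihk =>
    intro frame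
    induction frame with
    | nil => intro rest st; rw [runB]; simp
    | cons f fr ihfr =>
      intro rest st
      match k with
      | 0 =>
        rw [runB]
        by_cases h : st.1.getD f false = false
        · rw [if_pos h, ihfr]
          simp only [List.foldl_cons, fA]
          rw [if_pos h]
          rfl
        · rw [if_neg h, ihfr]
          simp only [List.foldl_cons, fA]
          rw [if_neg h]
      | j + 1 =>
        rw [runB]
        by_cases h : st.1.getD f false = false
        · rw [if_pos h, ihk j (by omega), ihfr]
          simp only [List.foldl_cons, fA]
          rw [if_pos h, goA_succ]
        · rw [if_neg h, ihfr]
          simp only [List.foldl_cons, fA]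
          rw [if_neg h]

-- ===== VERDICT (by name: the statement is the Claim_ definition above) =====
theorem find_min_node_spec : Claim_equal_find_min_node := by
  intro node relations cost_friendships new_visited min_cost_friendship target_friend _ _
  unfold Spec_find_min_node find_min_node find_min_node_alt
  rw [runB_frame, runB, goA_succ]
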